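-- pv_equiv track=rewrite | github.com/ShivOnly/datagen | backend/schema_web_suggest.py | _fallback_templates
-- ===== SOURCE A (Python) =====
-- from typing import List, Dict, Tuple, Optional
--
-- def _fallback_templates(description: str) -> List[Tuple[str, str]]:
--     d = description.lower()
--
--     def pack(names: List[str], descs: List[str]) -> List[Tuple[str, str]]:
--         return list(zip(names, descs))
--
--     if any(k in d for k in ["ecommerce", "e-commerce", "order", "retail", "shop", "cart"]):
--         return pack(
--             ["order_id", "order_date", "customer_id", "product_id", "quantity", "unit_price", "order_total"],
--             [
--                 "Unique order identifier",
--                 "Date of the order",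
--                 "Reference to the customer",
--                 "Reference to the product",
--                 "Units ordered",
--                 "Price per unit",
--                 "Computed total for the order",
--             ],
--         )
--
--     if any(k in d for k in ["student", "education", "exam", "grades", "school", "university"]):
--         return pack(
--             ["student_id", "name", "class", "subject", "score", "exam_date"],
--             [
--                 "Unique student identifier",
--                 "Student full name",
--                 "Class/grade level",
--                 "Subject name",
--                 "Marks/score obtained",
--                 "Date of examination",
--             ],
--         )
--
--     if any(k in d for k in ["transactions", "bank", "finance", "ledger", "payment"]):
--         return pack(
--             ["txn_id", "account_id", "txn_date", "amount", "merchant", "category", "status"],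
--             [
--                 "Unique transaction identifier",
--                 "Linked account identifier",
--                 "Date of transaction",
--                 "Signed transaction amount",
--                 "Merchant/payee",
--                 "Spending category",
--                 "Cleared/pending status",
--             ],
--         )
--
--     if any(k in d for k in ["weather", "climate", "temperature"]):
--         return pack(
--             ["date", "location", "temperature_c", "humidity_pct", "precip_mm", "wind_kph", "condition"],
--             [
--                 "Calendar date",
--                 "Station/city",
--                 "Air temperature (°C)",
--                 "Relative humidity (%)",
--                 "Precipitation (mm)",
--                 "Wind speed (kph)",
--                 "Textual weather condition",
--             ],
--         )
--
--     return pack(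
--         ["id", "name", "category", "description", "created_at", "value"],
--         [
--             "Unique identifier",
--             "Entity name",
--             "High-level grouping",
--             "Short description",
--             "Creation timestamp",
--             "Primary numeric or textual value",
--         ],
--     )
-- ===== SOURCE B (Python) =====
-- from typing import List, Tuple
--
-- # Flat inverted index: each keyword maps to the priority index of its category.
-- KEYWORD_CAT = {
--     "ecommerce": 0, "e-commerce": 0, "order": 0, "retail": 0, "shop": 0, "cart": 0,
--     "student": 1, "education": 1, "exam": 1, "grades": 1, "school": 1, "university": 1,
--     "transactions": 2, "bank": 2, "finance": 2, "ledger": 2, "payment": 2,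
--     "weather": 3, "climate": 3, "temperature": 3,
-- }
--
-- # Templates stored already paired (name, description); index 4 is the default.
-- TEMPLATES: List[List[Tuple[str, str]]] = [
--     [("order_id", "Unique order identifier"),
--      ("order_date", "Date of the order"),
--      ("customer_id", "Reference to the customer"),
--      ("product_id", "Reference to the product"),
--      ("quantity", "Units ordered"),
--      ("unit_price", "Price per unit"),
--      ("order_total", "Computed total for the order")],
--     [("student_id", "Unique student identifier"),
--      ("name", "Student full name"),
--      ("class", "Class/grade level"),
--      ("subject", "Subject name"),
--      ("score", "Marks/score obtained"),
--      ("exam_date", "Date of examination")],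
--     [("txn_id", "Unique transaction identifier"),
--      ("account_id", "Linked account identifier"),
--      ("txn_date", "Date of transaction"),
--      ("amount", "Signed transaction amount"),
--      ("merchant", "Merchant/payee"),
--      ("category", "Spending category"),
--      ("status", "Cleared/pending status")],
--     [("date", "Calendar date"),
--      ("location", "Station/city"),
--      ("temperature_c", "Air temperature (°C)"),
--      ("humidity_pct", "Relative humidity (%)"),
--      ("precip_mm", "Precipitation (mm)"),
--      ("wind_kph", "Wind speed (kph)"),
--      ("condition", "Textual weather condition")],
--     [("id", "Unique identifier"),
--      ("name", "Entity name"),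
--      ("category", "High-level grouping"),
--      ("description", "Short description"),
--      ("created_at", "Creation timestamp"),
--      ("value", "Primary numeric or textual value")],
-- ]
--
--
-- def _fallback_templates(description: str) -> List[Tuple[str, str]]:
--     d = description.lower()
--     matched = [cat for kw, cat in KEYWORD_CAT.items() if kw in d]
--     return list(TEMPLATES[min(matched) if matched else 4])
-- ===== Notes on version B (the rewrite author's own statement) =====
-- stated objective: alternative
-- what changed: Replaces the ordered if-chain of grouped any()-checks by a flat inverted keyword-to-category index: a single comprehension collects the categories of all matching keywords, min() picks the best-priority category, and the result is read from a table of pre-paired (name, description) templates (no zip, no early return).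
import Mathlib
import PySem

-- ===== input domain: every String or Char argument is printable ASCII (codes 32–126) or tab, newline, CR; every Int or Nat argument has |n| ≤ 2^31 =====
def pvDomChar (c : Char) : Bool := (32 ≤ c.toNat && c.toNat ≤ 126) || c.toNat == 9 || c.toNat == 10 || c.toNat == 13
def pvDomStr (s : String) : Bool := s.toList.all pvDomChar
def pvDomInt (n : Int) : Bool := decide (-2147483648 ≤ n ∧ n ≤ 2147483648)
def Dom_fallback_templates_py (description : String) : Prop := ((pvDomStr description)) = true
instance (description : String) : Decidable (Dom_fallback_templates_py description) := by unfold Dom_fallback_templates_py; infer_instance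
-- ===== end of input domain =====

-- B replaces A's ordered if-chain of grouped keyword checks by a flat inverted
-- keyword→category index: collect the categories of ALL matching keywords and pick
-- the minimum (best priority), indexing into a table of pre-paired templates (objective: alternative).

-- ===== PORT A =====
-- pack(names, descs) = list(zip(names, descs))
def pvPack (names descs : List String) : List (String × String) := names.zip descs

def fallback_templates_py (description : String) : List (String × String) :=
  let d := PySem.Str.lower description
  if (["ecommerce", "e-commerce", "order", "retail", "shop", "cart"].any
        (fun k => PySem.Str.isIn k d)) then
    pvPack
      ["order_id", "order_date", "customer_id", "product_id", "quantity", "unit_price", "order_total"]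
      ["Unique order identifier", "Date of the order", "Reference to the customer",
       "Reference to the product", "Units ordered", "Price per unit", "Computed total for the order"]
  else if (["student", "education", "exam", "grades", "school", "university"].any
        (fun k => PySem.Str.isIn k d)) then
    pvPack
      ["student_id", "name", "class", "subject", "score", "exam_date"]
      ["Unique student identifier", "Student full name", "Class/grade level",
       "Subject name", "Marks/score obtained", "Date of examination"]
  else if (["transactions", "bank", "finance", "ledger", "payment"].any
        (fun k => PySem.Str.isIn k d)) then
    pvPack
      ["txn_id", "account_id", "txn_date", "amount", "merchant", "category", "status"]
      ["Unique transaction identifier", "Linked account identifier", "Date of transaction",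
       "Signed transaction amount", "Merchant/payee", "Spending category", "Cleared/pending status"]
  else if (["weather", "climate", "temperature"].any
        (fun k => PySem.Str.isIn k d)) then
    pvPack
      ["date", "location", "temperature_c", "humidity_pct", "precip_mm", "wind_kph", "condition"]
      ["Calendar date", "Station/city", "Air temperature (°C)", "Relative humidity (%)",
       "Precipitation (mm)", "Wind speed (kph)", "Textual weather condition"]
  else
    pvPack
      ["id", "name", "category", "description", "created_at", "value"]
      ["Unique identifier", "Entity name", "High-level grouping", "Short description",
       "Creation timestamp", "Primary numeric or textual value"]

-- ===== PORT B =====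
-- flat inverted index KEYWORD_CAT: keyword → category priority
def pvKeywordCat : List (String × Nat) :=
  [("ecommerce", 0), ("e-commerce", 0), ("order", 0), ("retail", 0), ("shop", 0), ("cart", 0),
   ("student", 1), ("education", 1), ("exam", 1), ("grades", 1), ("school", 1), ("university", 1),
   ("transactions", 2), ("bank", 2), ("finance", 2), ("ledger", 2), ("payment", 2),
   ("weather", 3), ("climate", 3), ("temperature", 3)]

-- TEMPLATES: pre-paired (name, description) rows; index 4 is the default
def pvTemplates : List (List (String × String)) :=
  [ [("order_id", "Unique order identifier"), ("order_date", "Date of the order"),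
     ("customer_id", "Reference to the customer"), ("product_id", "Reference to the product"),
     ("quantity", "Units ordered"), ("unit_price", "Price per unit"),
     ("order_total", "Computed total for the order")],
    [("student_id", "Unique student identifier"), ("name", "Student full name"),
     ("class", "Class/grade level"), ("subject", "Subject name"),
     ("score", "Marks/score obtained"), ("exam_date", "Date of examination")],
    [("txn_id", "Unique transaction identifier"), ("account_id", "Linked account identifier"),
     ("txn_date", "Date of transaction"), ("amount", "Signed transaction amount"),
     ("merchant", "Merchant/payee"), ("category", "Spending category"),
     ("status", "Cleared/pending status")],
    [("date", "Calendar date"), ("location", "Station/city"),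
     ("temperature_c", "Air temperature (°C)"), ("humidity_pct", "Relative humidity (%)"),
     ("precip_mm", "Precipitation (mm)"), ("wind_kph", "Wind speed (kph)"),
     ("condition", "Textual weather condition")],
    [("id", "Unique identifier"), ("name", "Entity name"), ("category", "High-level grouping"),
     ("description", "Short description"), ("created_at", "Creation timestamp"),
     ("value", "Primary numeric or textual value")] ]

-- the comprehension '[cat for kw, cat in KEYWORD_CAT.items() if kw in d]'
def pvMatched (d : String) : List Nat :=
  (pvKeywordCat.filter (fun kc => PySem.Str.isIn kc.1 d)).map (fun kc => kc.2)

-- TEMPLATES[min(matched) if matched else 4]; the computed index is always < 5,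
-- so plain list indexing (getD's default is unreachable)
def fallback_templates_py_alt (description : String) : List (String × String) :=
  let d := PySem.Str.lower description
  let matched := pvMatched d
  pvTemplates.getD
    (match PySem.List.min? matched (fun x => x) with
     | some m => m
     | none => 4) []

-- ===== PRECONDITION & SPEC =====
def Spec_fallback_templates_py (description : String) (out : List (String × String)) : Prop := out = fallback_templates_py_alt description
instance (description : String) (out : List (String × String)) : Decidable (Spec_fallback_templates_py description out) := by unfold Spec_fallback_templates_py; infer_instance

-- ===== CLAIM =====
def Claim_equal_fallback_templates_py : Prop := ∀ (description : String), Dom_fallback_templates_py description → Spec_fallback_templates_py description (fallback_templates_py description)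

-- ===== LEMMAS AND PROOFS =====
-- every entry of the inverted index belongs to exactly one keyword group
theorem kw_of_cat : ∀ p ∈ pvKeywordCat,
    (p.2 = 0 ∧ p.1 ∈ ["ecommerce", "e-commerce", "order", "retail", "shop", "cart"]) ∨
    (p.2 = 1 ∧ p.1 ∈ ["student", "education", "exam", "grades", "school", "university"]) ∨
    (p.2 = 2 ∧ p.1 ∈ ["transactions", "bank", "finance", "ledger", "payment"]) ∨
    (p.2 = 3 ∧ p.1 ∈ ["weather", "climate", "temperature"]) := by decide

theorem mem_pvMatched (d : String) (y : Nat) :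
    y ∈ pvMatched d ↔ ∃ k, (k, y) ∈ pvKeywordCat ∧ PySem.Str.isIn k d = true := by
  simp only [pvMatched, List.mem_map, List.mem_filter]
  constructor
  · rintro ⟨⟨k, c⟩, ⟨hmem, hin⟩, rfl⟩
    exact ⟨k, hmem, hin⟩
  · rintro ⟨k, hmem, hin⟩
    exact ⟨(k, y), ⟨hmem, hin⟩, rfl⟩

-- category c is matched iff some keyword of its group occurs in d
theorem cat_mem_iff (d : String) :
    ∀ c ∈ ([0, 1, 2, 3] : List Nat),
      (c ∈ pvMatched d ↔
        ((pvKeywordCat.filter (fun p => p.2 == c)).map Prod.fst).any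
          (fun k => PySem.Str.isIn k d) = true) := by
  intro c hc
  rw [mem_pvMatched]
  simp only [List.any_eq_true, List.mem_map, List.mem_filter]
  constructor
  · rintro ⟨k, hmem, hin⟩
    refine ⟨k, ⟨(k, c), ⟨hmem, by simp⟩, rfl⟩, hin⟩
  · rintro ⟨k, ⟨⟨k', c'⟩, ⟨hmem, hbeq⟩, rfl⟩, hin⟩
    have : c' = c := by simpa using hbeq
    exact ⟨k', this ▸ hmem, hin⟩

-- the minimum of the matched categories is c when c is matched and nothing smaller is
theorem min_eq_of_bounds {d : String} (c : Nat) (hmem : c ∈ pvMatched d)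
    (hlow : ∀ j, j < c → j ∉ pvMatched d) :
    PySem.List.min? (pvMatched d) (fun x => x) = some c := by
  cases h : PySem.List.min? (pvMatched d) (fun x => x) with
  | none =>
      rw [(PySem.List.min?_eq_none_iff (pvMatched d) (fun x => x)).mp h] at hmem
      simp at hmem
  | some m =>
      have hm_mem := PySem.List.min?_mem h
      have hle : m ≤ c := PySem.List.min?_isMin h c hmem
      have : ¬ m < c := fun hlt => hlow m hlt hm_mem
      have : m = c := by omega
      simp [this]

theorem min_matched_char (d : String) :
    PySem.List.min? (pvMatched d) (fun x => x) =
      (if (["ecommerce", "e-commerce", "order", "retail", "shop", "cart"].any (fun k => PySem.Str.isIn k d)) then some 0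
       else if (["student", "education", "exam", "grades", "school", "university"].any (fun k => PySem.Str.isIn k d)) then some 1
       else if (["transactions", "bank", "finance", "ledger", "payment"].any (fun k => PySem.Str.isIn k d)) then some 2
       else if (["weather", "climate", "temperature"].any (fun k => PySem.Str.isIn k d)) then some 3
       else none) := by
  have hiff : ∀ c ∈ ([0, 1, 2, 3] : List Nat), ∀ l : List String,
      ((pvKeywordCat.filter (fun p => p.2 == c)).map Prod.fst) = l →
      (c ∈ pvMatched d ↔ l.any (fun k => PySem.Str.isIn k d) = true) := by
    intro c hc l hl
    rw [← hl]; exact cat_mem_iff d c hc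
  have h0 := hiff 0 (by decide) ["ecommerce", "e-commerce", "order", "retail", "shop", "cart"] (by decide)
  have h1 := hiff 1 (by decide) ["student", "education", "exam", "grades", "school", "university"] (by decide)
  have h2 := hiff 2 (by decide) ["transactions", "bank", "finance", "ledger", "payment"] (by decide)
  have h3 := hiff 3 (by decide) ["weather", "climate", "temperature"] (by decide)
  split_ifs with g0 g1 g2 g3
  -- in each positive case the group index is in matched and all smaller ones are not
  · exact min_eq_of_bounds 0 (h0.mpr g0) (by intro j hj; omega)
  · exact min_eq_of_bounds 1 (h1.mpr g1) (by
      intro j hj hm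
      interval_cases j
      exact g0 (h0.mp hm))
  · exact min_eq_of_bounds 2 (h2.mpr g2) (by
      intro j hj hm
      interval_cases j
      · exact g0 (h0.mp hm)
      · exact g1 (h1.mp hm))
  · exact min_eq_of_bounds 3 (h3.mpr g3) (by
      intro j hj hm
      interval_cases j
      · exact g0 (h0.mp hm)
      · exact g1 (h1.mp hm)
      · exact g2 (h2.mp hm))
  · -- no keyword matches: the comprehension is empty
    have hempty : pvMatched d = [] := by
      rw [List.eq_nil_iff_forall_not_mem]
      intro x hx
      obtain ⟨k, hkc, hin⟩ := (mem_pvMatched d x).mp hx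
      rcases kw_of_cat (k, x) hkc with ⟨_, hk⟩ | ⟨_, hk⟩ | ⟨_, hk⟩ | ⟨_, hk⟩
      · exact g0 (List.any_eq_true.mpr ⟨k, hk, hin⟩)
      · exact g1 (List.any_eq_true.mpr ⟨k, hk, hin⟩)
      · exact g2 (List.any_eq_true.mpr ⟨k, hk, hin⟩)
      · exact g3 (List.any_eq_true.mpr ⟨k, hk, hin⟩)
    exact (PySem.List.min?_eq_none_iff (pvMatched d) (fun x => x)).mpr hempty

-- ===== VERDICT =====
theorem fallback_templates_py_spec : Claim_equal_fallback_templates_py := by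
  intro description _
  unfold Spec_fallback_templates_py fallback_templates_py fallback_templates_py_alt
  simp only [min_matched_char]
  split_ifs <;> rfl
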